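-- pv_equiv track=rewrite | github.com/purohitgm/blank-app | nifty500_screener-1.py | score_pips
-- ===== SOURCE A (Python) =====
-- def score_pips(score: int) -> str:
--     clr = {6:"#ffd700",5:"#f97316",4:"#22c55e",3:"#22d3ee",
--            2:"#e0e0e0",1:"#666",0:"#222"}.get(score, "#222")
--     pips = "".join(
--         f'<span style="display:inline-block;width:7px;height:13px;margin-right:2px;'
--         f'background:{clr if i < score else "#1a1a1a"};'
--         f'border:1px solid {clr if i < score else "#2a2a2a"}"></span>'
--         for i in range(6)
--     )
--     return (f'<span style="color:{clr};font-weight:700;font-size:14px;'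
--             f'font-family:monospace">{score}</span>&nbsp;{pips}')
-- ===== SOURCE B (Python) =====
-- def score_pips(score: int) -> str:
--     clr = {6:"#ffd700",5:"#f97316",4:"#22c55e",3:"#22d3ee",
--            2:"#e0e0e0",1:"#666",0:"#222"}.get(score, "#222")
--     # table-driven: slide a 6-wide window over a fixed 12-cell mask, then map
--     # each mask cell to its span via a 2-entry lookup table
--     filled = 0 if score < 0 else 6 if score > 6 else score
--     span = {
--         "X": ('<span style="display:inline-block;width:7px;height:13px;margin-right:2px;'
--               f'background:{clr};border:1px solid {clr}"></span>'),
--         ".": ('<span style="display:inline-block;width:7px;height:13px;margin-right:2px;'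
--               'background:#1a1a1a;border:1px solid #2a2a2a"></span>'),
--     }
--     pips = "".join(span[c] for c in "XXXXXX......"[6 - filled : 12 - filled])
--     return (f'<span style="color:{clr};font-weight:700;font-size:14px;'
--             f'font-family:monospace">{score}</span>&nbsp;{pips}')
-- ===== Notes on version B (the rewrite author's own statement) =====
-- stated objective: alternative
-- what changed: Replaces the per-pip conditional inside the join over the pip indices by a table-driven scheme: slide a row-wide window over a fixed filled-then-empty mask string and map each mask cell to its span through a small lookup table.
import Mathlib
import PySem

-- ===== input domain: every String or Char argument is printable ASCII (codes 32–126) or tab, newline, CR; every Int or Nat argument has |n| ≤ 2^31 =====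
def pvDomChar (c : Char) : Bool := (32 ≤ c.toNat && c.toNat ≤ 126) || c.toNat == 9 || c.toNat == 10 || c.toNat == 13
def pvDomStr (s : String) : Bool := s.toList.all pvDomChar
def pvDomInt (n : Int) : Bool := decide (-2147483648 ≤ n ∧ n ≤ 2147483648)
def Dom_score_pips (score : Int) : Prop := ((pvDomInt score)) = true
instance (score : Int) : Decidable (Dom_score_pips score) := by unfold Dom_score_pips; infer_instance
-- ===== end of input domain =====

set_option maxRecDepth 4000


-- B is table-driven: it slides a 6-wide window over a fixed 12-cell mask and maps each
-- mask cell to its span through a 2-entry lookup table (simpler decomposition, same output).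

-- ===== PORT A =====
def score_pips (score : Int) : String :=
  let clr := (PySem.Dict.ofList [((6:Int),"#ffd700"),(5,"#f97316"),(4,"#22c55e"),(3,"#22d3ee"),
              (2,"#e0e0e0"),(1,"#666"),(0,"#222")]).getD score "#222"
  let pips := String.join ((PySem.List.pyRange 0 6 1).map (fun i =>
    "<span style=\"display:inline-block;width:7px;height:13px;margin-right:2px;background:"
      ++ (if i < score then clr else "#1a1a1a")
      ++ ";border:1px solid "
      ++ (if i < score then clr else "#2a2a2a")
      ++ "\"></span>"))
  "<span style=\"color:" ++ clr ++ ";font-weight:700;font-size:14px;font-family:monospace\">"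
    ++ PySem.Int.toStr score ++ "</span>&nbsp;" ++ pips

-- ===== PORT B =====
def score_pips_alt (score : Int) : String :=
  let clr := (PySem.Dict.ofList [((6:Int),"#ffd700"),(5,"#f97316"),(4,"#22c55e"),(3,"#22d3ee"),
              (2,"#e0e0e0"),(1,"#666"),(0,"#222")]).getD score "#222"
  let filled : Int := if score < 0 then 0 else if score > 6 then 6 else score
  let span := PySem.Dict.ofList
    [('X', "<span style=\"display:inline-block;width:7px;height:13px;margin-right:2px;background:"
            ++ clr ++ ";border:1px solid " ++ clr ++ "\"></span>"),
     ('.', "<span style=\"display:inline-block;width:7px;height:13px;margin-right:2px;background:#1a1a1a;border:1px solid #2a2a2a\"></span>")]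
  -- span[c]: every mask cell is a key of the table, so the KeyError branch is unreachable; ported as getD
  let pips := String.join
    ((PySem.List.slice ("XXXXXX......".toList) (some (6 - filled)) (some (12 - filled))).map
      (fun c => span.getD c ""))
  "<span style=\"color:" ++ clr ++ ";font-weight:700;font-size:14px;font-family:monospace\">"
    ++ PySem.Int.toStr score ++ "</span>&nbsp;" ++ pips

-- ===== PRECONDITION & SPEC =====
def Spec_score_pips (score : Int) (out : String) : Prop := out = score_pips_alt score
instance (score : Int) (out : String) : Decidable (Spec_score_pips score out) := by unfold Spec_score_pips; infer_instance

-- ===== CLAIM (what is proved, stated in full; the proofs are below) =====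
def Claim_equal_score_pips : Prop := ∀ (score : Int), Dom_score_pips score → Spec_score_pips score (score_pips score)

-- ===== LEMMAS AND PROOFS =====

-- the per-pip f-string collapses to a two-way choice between the full filled/empty spans
theorem ite_span (c : Prop) [Decidable c] (P M S a b x y : String) :
    P ++ (if c then a else x) ++ M ++ (if c then b else y) ++ S
      = if c then P ++ a ++ M ++ b ++ S else P ++ x ++ M ++ y ++ S := by
  split <;> rfl

theorem range6 : PySem.List.pyRange 0 6 1 = [0, 1, 2, 3, 4, 5] := by decide

-- A's six conditional spans coincide with B's mask-window spans mapped through the table,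
-- for any color string
theorem join_mask (score : Int) (fspan espan : String) :
    String.join [if (0:Int) < score then fspan else espan, if (1:Int) < score then fspan else espan,
      if (2:Int) < score then fspan else espan, if (3:Int) < score then fspan else espan,
      if (4:Int) < score then fspan else espan, if (5:Int) < score then fspan else espan]
      = String.join
          ((PySem.List.slice ("XXXXXX......".toList)
              (some (6 - (if score < 0 then 0 else if score > 6 then 6 else score)))
              (some (12 - (if score < 0 then 0 else if score > 6 then 6 else score)))).map
            (fun c => (PySem.Dict.ofList
              [('X', fspan), ('.', espan)]).getD c "")) := by
  have hget : ∀ c : Char,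
      (PySem.Dict.ofList [('X', fspan), ('.', espan)]).getD c ""
        = if c = '.' then espan else if c = 'X' then fspan else "" := by
    intro c
    rw [show PySem.Dict.ofList [('X', fspan), ('.', espan)]
        = (PySem.Dict.empty.insert 'X' fspan).insert '.' espan from rfl,
      PySem.Dict.getD_insert, PySem.Dict.getD_insert, PySem.Dict.getD_empty]
  rcases le_or_gt score 0 with h | h
  · have hf : (if score < 0 then 0 else if score > 6 then 6 else score) = 0 := by
      split_ifs <;> omega
    rw [hf, show PySem.List.slice ("XXXXXX......".toList) (some ((6:Int) - 0)) (some (12 - 0)) = ['.','.','.','.','.','.'] from by decide]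
    simp only [List.map, hget,
      if_neg (by omega : ¬ ((0:Int) < score)), if_neg (by omega : ¬ ((1:Int) < score)),
      if_neg (by omega : ¬ ((2:Int) < score)), if_neg (by omega : ¬ ((3:Int) < score)),
      if_neg (by omega : ¬ ((4:Int) < score)), if_neg (by omega : ¬ ((5:Int) < score))]
    simp
  · rcases le_or_gt 6 score with h6 | h6
    · have hf : (if score < 0 then 0 else if score > 6 then 6 else score) = 6 := by
        split_ifs <;> omega
      rw [hf, show PySem.List.slice ("XXXXXX......".toList) (some ((6:Int) - 6)) (some (12 - 6)) = ['X','X','X','X','X','X'] from by decide]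
      simp only [List.map, hget,
        if_pos (by omega : (0:Int) < score), if_pos (by omega : (1:Int) < score),
        if_pos (by omega : (2:Int) < score), if_pos (by omega : (3:Int) < score),
        if_pos (by omega : (4:Int) < score), if_pos (by omega : (5:Int) < score)]
      simp
    · have h5 : score = 1 ∨ score = 2 ∨ score = 3 ∨ score = 4 ∨ score = 5 := by omega
      rcases h5 with rfl | rfl | rfl | rfl | rfl
      · have hf : (if (1:Int) < 0 then 0 else if (1:Int) > 6 then 6 else (1:Int)) = 1 := by norm_num
        rw [hf, show PySem.List.slice ("XXXXXX......".toList) (some ((6:Int) - 1)) (some (12 - 1)) = ['X','.','.','.','.','.'] from by decide]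
        simp [hget]
      · have hf : (if (2:Int) < 0 then 0 else if (2:Int) > 6 then 6 else (2:Int)) = 2 := by norm_num
        rw [hf, show PySem.List.slice ("XXXXXX......".toList) (some ((6:Int) - 2)) (some (12 - 2)) = ['X','X','.','.','.','.'] from by decide]
        simp [hget]
      · have hf : (if (3:Int) < 0 then 0 else if (3:Int) > 6 then 6 else (3:Int)) = 3 := by norm_num
        rw [hf, show PySem.List.slice ("XXXXXX......".toList) (some ((6:Int) - 3)) (some (12 - 3)) = ['X','X','X','.','.','.'] from by decide]
        simp [hget]
      · have hf : (if (4:Int) < 0 then 0 else if (4:Int) > 6 then 6 else (4:Int)) = 4 := by norm_num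
        rw [hf, show PySem.List.slice ("XXXXXX......".toList) (some ((6:Int) - 4)) (some (12 - 4)) = ['X','X','X','X','.','.'] from by decide]
        simp [hget]
      · have hf : (if (5:Int) < 0 then 0 else if (5:Int) > 6 then 6 else (5:Int)) = 5 := by norm_num
        rw [hf, show PySem.List.slice ("XXXXXX......".toList) (some ((6:Int) - 5)) (some (12 - 5)) = ['X','X','X','X','X','.'] from by decide]
        simp [hget]

-- ===== VERDICT (by name: the statement is the Claim_ definition above) =====
theorem score_pips_spec : Claim_equal_score_pips := by
  intro score _
  unfold Spec_score_pips score_pips score_pips_alt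
  rw [range6]
  simp only [List.map, ite_span]
  rw [join_mask]
  rfl
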